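-- pv_equiv track=rewrite | github.com/moldovancsaba/sovereign | apps/sovereign/scripts/nexus/orchestrate.py | resolve_model_name
-- ===== SOURCE A (Python) =====
-- from typing import Any, Dict, List
--
-- def resolve_model_name(requested: str, available: List[str]) -> str:
--     req = str(requested or "").strip()
--     if not req or not available:
--         return req
--     if req in available:
--         return req
--
--     req_lower = req.lower()
--     lower_map = {m.lower(): m for m in available}
--     if req_lower in lower_map:
--         return lower_map[req_lower]
--
--     base = req.split(":")[0].lower()
--     by_base = [m for m in available if m.split(":")[0].lower() == base]
--     if by_base:
--         by_base.sort(key=lambda x: (":instruct" in x, x.endswith(":latest"), len(x)), reverse=True)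
--         return by_base[0]
--     return req
-- ===== SOURCE B (Python) =====
-- def resolve_model_name(requested, available):
--     req = str(requested or "").strip()
--     if not req or not available:
--         return req
--     if req in available:
--         return req
--
--     req_lower = req.lower()
--     base = req.split(":")[0].lower()
--
--     def score(m):
--         return (":instruct" in m, m.endswith(":latest"), len(m))
--
--     lower_hit = None
--     best = None
--     for m in available:
--         if m.lower() == req_lower:
--             lower_hit = m  # last such m wins, like dict-comprehension overwrite
--         if m.split(":")[0].lower() == base and (best is None or score(best) < score(m)):
--             best = m
--     if lower_hit is not None:
--         return lower_hit
--     if best is not None: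
--         return best
--     return req
-- ===== Notes on version B (the rewrite author's own statement) =====
-- stated objective: faster
-- what changed: Replaces A's lowercase dict build plus base-filter plus reverse stable sort with a single pass over the available list that tracks the last lowercase match and the first score-maximal base match, removing the O(n log n) sort and the intermediate dict and list.
import Mathlib
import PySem

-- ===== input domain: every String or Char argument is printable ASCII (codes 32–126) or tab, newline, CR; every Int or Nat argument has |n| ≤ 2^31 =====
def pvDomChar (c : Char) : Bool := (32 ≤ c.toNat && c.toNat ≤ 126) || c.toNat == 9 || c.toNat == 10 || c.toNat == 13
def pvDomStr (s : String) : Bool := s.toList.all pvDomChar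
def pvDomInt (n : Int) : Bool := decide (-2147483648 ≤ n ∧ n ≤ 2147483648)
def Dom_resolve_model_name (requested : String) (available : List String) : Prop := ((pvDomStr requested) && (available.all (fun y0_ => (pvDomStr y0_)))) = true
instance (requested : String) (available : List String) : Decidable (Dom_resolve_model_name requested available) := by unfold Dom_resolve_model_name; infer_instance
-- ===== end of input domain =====

-- B replaces the dict build + base filter + reverse sort by one pass over `available`
-- tracking the last lowercase match and the first score-maximal base match (no sort, no dict).

-- m.split(":")[0].lower()  (the `.getD []` is a totality guard only: ":" ≠ "" so split? is `some`;
-- the index 0 is in range since split always returns a nonempty list)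
def pvBase (s : String) : String :=
  PySem.Str.lower (PySem.List.pyGetD ((PySem.Str.split? s ":").getD []) 0 "")

-- the sort key (":instruct" in m, m.endswith(":latest"), len(m)): Python compares the tuple
-- lexicographically with False < True, which is exactly `<` on this 3-element List Int (bools as 0/1)
def pvScore (m : String) : List Int :=
  [if PySem.Str.isIn ":instruct" m then 1 else 0,
   if PySem.Str.endswith m ":latest" then 1 else 0,
   PySem.Str.len m]

-- ===== PORT A =====
def resolve_model_name (requested : String) (available : List String) : String :=
  let req := PySem.Str.strip requested
  if req = "" ∨ available = [] then req
  else if req ∈ available then req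
  else
    let req_lower := PySem.Str.lower req
    let lower_map := available.foldl (fun d m => d.insert (PySem.Str.lower m) m)
      (PySem.Dict.empty : PySem.Dict String String)
    match lower_map.get? req_lower with
    | some v => v
    | none =>
      let base := pvBase req
      let by_base := available.filter (fun m => pvBase m = base)
      if by_base = [] then req
      else PySem.List.pyGetD (PySem.List.sorted by_base pvScore true) 0 ""

-- the two per-element updates of B's loop body
def pvLowStep (req_lower : String) (acc : Option String) (m : String) : Option String :=
  if PySem.Str.lower m = req_lower then some m else acc

def pvBestStep (base : String) (o : Option String) (m : String) : Option String :=
  match o with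
  | none => if pvBase m = base then some m else none
  | some b => if pvBase m = base ∧ pvScore b < pvScore m then some m else some b

-- ===== PORT B =====
def resolve_model_name_alt (requested : String) (available : List String) : String :=
  let req := PySem.Str.strip requested
  if req = "" ∨ available = [] then req
  else if req ∈ available then req
  else
    let req_lower := PySem.Str.lower req
    let base := pvBase req
    let st := available.foldl
      (fun (st : Option String × Option String) m => (pvLowStep req_lower st.1 m, pvBestStep base st.2 m))
      (none, none)
    match st.1 with
    | some v => v
    | none =>
      match st.2 with
      | some b => b
      | none => req

-- ===== PRECONDITION & SPEC =====
def Spec_resolve_model_name (requested : String) (available : List String) (out : String) : Prop := out = resolve_model_name_alt requested available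
instance (requested : String) (available : List String) (out : String) : Decidable (Spec_resolve_model_name requested available out) := by unfold Spec_resolve_model_name; infer_instance

-- ===== CLAIM (what is proved, stated in full; the proofs are below) =====
def Claim_equal_resolve_model_name : Prop := ∀ (requested : String) (available : List String), Dom_resolve_model_name requested available → Spec_resolve_model_name requested available (resolve_model_name requested available)

-- ===== LEMMAS AND PROOFS =====

-- a fold over a pair whose components are updated independently splits into two folds
theorem pv_foldl_pair {α β γ : Type} (f : β → α → β) (g : γ → α → γ) :
    ∀ (l : List α) (s : β × γ),
      l.foldl (fun st m => (f st.1 m, g st.2 m)) s = (l.foldl f s.1, l.foldl g s.2) := by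
  intro l
  induction l with
  | nil => intro s; rfl
  | cons m t ih => intro s; simp [List.foldl_cons, ih]

-- A's key-indexed dict lookup = B's "last match wins" fold (key abstract)
theorem pv_dict_last (key : String → String) (k : String) :
    ∀ (l : List String) (d : PySem.Dict String String),
      (l.foldl (fun d m => d.insert (key m) m) d).get? k
        = l.foldl (fun acc m => if key m = k then some m else acc) (d.get? k) := by
  intro l
  induction l with
  | nil => intro d; rfl
  | cons m t ih =>
    intro d
    simp only [List.foldl_cons, ih, PySem.Dict.get?_insert]
    by_cases h : key m = k
    · simp [h]
    · simp [h, Ne.symm h]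

-- head of a reverse-insertion step = the running "first maximum" step (key abstract)
theorem pv_insertBy_head {κ : Type} [LT κ] [DecidableLT κ] (key : String → κ) (x : String) :
    ∀ (acc : List String),
      (PySem.List.insertBy (fun a b => decide (key b < key a)) x acc).head?
        = match acc.head? with
          | none => some x
          | some m => some (if key m < key x then x else m) := by
  intro acc
  cases acc with
  | nil => rfl
  | cons y ys =>
    simp only [PySem.List.insertBy, List.head?_cons]
    by_cases h : key y < key x
    · simp [h]
    · simp [h]

-- head of A's stable reverse insertion sort = B's single-pass first-maximum fold (key abstract)
theorem pv_sorted_head {κ : Type} [LT κ] [DecidableLT κ] (key : String → κ) :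
    ∀ (l : List String) (acc : List String),
      (l.foldl (fun acc x => PySem.List.insertBy (fun a b => decide (key b < key a)) x acc) acc).head?
        = l.foldl (fun o x =>
            match o with
            | none => some x
            | some b => some (if key b < key x then x else b)) acc.head? := by
  intro l
  induction l with
  | nil => intro acc; rfl
  | cons x t ih =>
    intro acc
    simp only [List.foldl_cons, ih, pv_insertBy_head key]

-- B's best-candidate fold over the whole list = A's filter then running-first-maximum fold
-- (stated for an abstract predicate p and key, with the hypothesis that pvBestStep's tests follow p/key)
theorem pv_best_filter {κ : Type} [LT κ] [DecidableLT κ] (p : String → Bool) (key : String → κ)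
    (step : Option String → String → Option String)
    (hstep : ∀ o m, step o m = match o with
      | none => if p m then some m else none
      | some b => if p m ∧ key b < key m then some m else some b) :
    ∀ (l : List String) (o : Option String),
      l.foldl step o
        = (l.filter p).foldl
            (fun o x =>
              match o with
              | none => some x
              | some b => some (if key b < key x then x else b)) o := by
  intro l
  induction l with
  | nil => intro o; simp only [List.filter_nil, List.foldl_nil]
  | cons m t ih =>
    intro o
    simp only [List.foldl_cons, List.filter_cons, hstep]
    by_cases h : p m = true
    · simp only [h, if_true, List.foldl_cons, ih]
      congr 1
      cases o with
      | none => simp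
      | some b => by_cases h' : key b < key m <;> simp [h']
    · simp only [h, Bool.false_eq_true, if_false, ih]
      congr 1
      cases o with
      | none => simp
      | some b => simp

-- ===== VERDICT (by name: the statement is the Claim_ definition above) =====
theorem resolve_model_name_spec : Claim_equal_resolve_model_name := by
  intro requested available _
  unfold Spec_resolve_model_name resolve_model_name resolve_model_name_alt
  simp only []
  by_cases h1 : PySem.Str.strip requested = "" ∨ available = []
  · simp [h1]
  · simp only [h1, if_false]
    by_cases h2 : PySem.Str.strip requested ∈ available
    · simp [h2]
    · simp only [h2, if_false]
      rw [pv_foldl_pair (pvLowStep (PySem.Str.lower (PySem.Str.strip requested)))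
            (pvBestStep (pvBase (PySem.Str.strip requested)))]
      have hfun : (fun (acc : Option String) m =>
          if PySem.Str.lower m = PySem.Str.lower (PySem.Str.strip requested) then some m else acc)
          = pvLowStep (PySem.Str.lower (PySem.Str.strip requested)) := rfl
      rw [pv_dict_last PySem.Str.lower, PySem.Dict.get?_empty, hfun]
      -- the best-candidate fold of B equals filter-then-maxstep of A
      have hbb := pv_best_filter (fun m => decide (pvBase m = pvBase (PySem.Str.strip requested))) pvScore
        (pvBestStep (pvBase (PySem.Str.strip requested)))
        (by intro o m; cases o <;> simp [pvBestStep]) available none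
      cases hl : available.foldl (pvLowStep (PySem.Str.lower (PySem.Str.strip requested)))
          (none : Option String) with
      | some v => simp
      | none =>
        simp only []
        set bb := available.filter (fun m => pvBase m = pvBase (PySem.Str.strip requested)) with hbbdef
        rw [hbb]
        have hsh0 := pv_sorted_head pvScore bb []
        simp only [List.head?_nil] at hsh0
        rw [← hsh0, ← PySem.List.sorted_rev_eq_foldl_insertBy]
        by_cases hemp : bb = []
        · simp only [hemp, if_true]
          rfl
        · cases hsh : PySem.List.sorted bb pvScore true with
          | nil => exact absurd ((PySem.List.sorted_eq_nil_iff _ _ _).mp hsh) hemp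
          | cons hd tl => simp [hemp, PySem.List.pyGetD_zero_cons]
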